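-- pv_equiv track=rewrite | github.com/Saurabh528/assignment-wadhwani-submission | core/tts_manager.py | ensure_voice_consistency
-- ===== SOURCE A (Python) =====
-- from typing import Dict, List
--
-- def ensure_voice_consistency(character_name: str, scenes: List[Dict]) -> bool:
--     character_voices = {}
--
--     for scene in scenes:
--         if scene.get('character') == character_name:
--             voice_key = f"{scene.get('character_gender')}_{scene.get('voice_style')}"
--             if character_name in character_voices:
--                 if character_voices[character_name] != voice_key:
--                     return False
--             else:
--                 character_voices[character_name] = voice_key
--
--     return True
-- ===== SOURCE B (Python) =====
-- def ensure_voice_consistency(character_name, scenes):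
--     keys = [f"{s.get('character_gender')}_{s.get('voice_style')}"
--             for s in scenes if s.get('character') == character_name]
--     return not keys or min(keys) == max(keys)
-- ===== Notes on version B (the rewrite author's own statement) =====
-- stated objective: alternative
-- what changed: Replaces the stored-first-value dict with its membership branch and early return by an order-statistics check: collect the voice keys of the matching scenes and test min(keys) == max(keys), which holds iff all keys coincide.
import Mathlib
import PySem

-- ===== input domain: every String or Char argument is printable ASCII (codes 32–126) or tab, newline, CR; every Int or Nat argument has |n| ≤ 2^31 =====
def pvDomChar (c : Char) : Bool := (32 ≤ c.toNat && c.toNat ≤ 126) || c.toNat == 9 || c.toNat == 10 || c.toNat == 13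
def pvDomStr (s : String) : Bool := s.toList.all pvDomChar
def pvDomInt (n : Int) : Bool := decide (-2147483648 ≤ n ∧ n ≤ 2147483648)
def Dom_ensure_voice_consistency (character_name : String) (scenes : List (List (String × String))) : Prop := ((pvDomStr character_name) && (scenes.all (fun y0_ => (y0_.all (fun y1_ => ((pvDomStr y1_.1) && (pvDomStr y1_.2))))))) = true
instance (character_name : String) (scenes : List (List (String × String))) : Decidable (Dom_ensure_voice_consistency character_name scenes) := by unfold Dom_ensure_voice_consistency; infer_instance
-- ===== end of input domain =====

-- B replaces A's stored-first-value dict and early return by an order-statistics check: min(keys) == max(keys) over the matching scenes' voice keys (same cost, alternative algorithm).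


-- ===== PORT A =====
-- f"{o}" for o = scene.get(k): None prints "None", a str prints itself (shared f-string helper of both Pythons)
def pvFmt (o : Option String) : String :=
  match o with
  | none => "None"
  | some s => s

-- voice_key = f"{scene.get('character_gender')}_{scene.get('voice_style')}"
def pvVoiceKey (scene : List (String × String)) : String :=
  pvFmt ((PySem.Dict.mk scene).get? "character_gender") ++ "_" ++ pvFmt ((PySem.Dict.mk scene).get? "voice_style")

-- the 'for scene in scenes' loop of A, with the early 'return False'; character_voices is the dict cv
def evcLoop (character_name : String) (cv : PySem.Dict String String) : List (List (String × String)) → Bool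
  | [] => true
  | scene :: rest =>
    if (PySem.Dict.mk scene).get? "character" == some character_name then
      let voice_key := pvVoiceKey scene
      if cv.contains character_name then
        -- character_voices[character_name] cannot fail here (key just tested); getD with "" is that access
        if cv.getD character_name "" != voice_key then false
        else evcLoop character_name cv rest
      else evcLoop character_name (cv.insert character_name voice_key) rest
    else evcLoop character_name cv rest

def ensure_voice_consistency (character_name : String) (scenes : List (List (String × String))) : Bool :=
  evcLoop character_name PySem.Dict.empty scenes

-- ===== PORT B =====
-- keys = [voice_key(s) for s in scenes if s.get('character') == character_name]; return not keys or min(keys) == max(keys)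
def ensure_voice_consistency_alt (character_name : String) (scenes : List (List (String × String))) : Bool :=
  let keys : List String :=
    (scenes.filter (fun s => (PySem.Dict.mk s).get? "character" == some character_name)).map pvVoiceKey
  keys.isEmpty || (PySem.List.min? keys (fun x => x) == PySem.List.max? keys (fun x => x))

-- ===== PRECONDITION & SPEC =====
def Spec_ensure_voice_consistency (character_name : String) (scenes : List (List (String × String))) (out : Bool) : Prop := out = ensure_voice_consistency_alt character_name scenes
instance (character_name : String) (scenes : List (List (String × String))) (out : Bool) : Decidable (Spec_ensure_voice_consistency character_name scenes out) := by unfold Spec_ensure_voice_consistency; infer_instance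

-- ===== CLAIM (what is proved, stated in full; the proofs are below) =====
def Claim_equal_ensure_voice_consistency : Prop := ∀ (character_name : String) (scenes : List (List (String × String))), Dom_ensure_voice_consistency character_name scenes → Spec_ensure_voice_consistency character_name scenes (ensure_voice_consistency character_name scenes)

-- ===== LEMMAS AND PROOFS =====

-- the list of voice keys of the scenes matching character_name
def pvKeys (character_name : String) (scenes : List (List (String × String))) : List String :=
  (scenes.filter (fun s => (PySem.Dict.mk s).get? "character" == some character_name)).map pvVoiceKey

-- once a key is stored for character_name, A's loop returns true iff every later matching key equals it
theorem evcLoop_stored (character_name v : String) (scenes : List (List (String × String)))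
    (cv : PySem.Dict String String) (h : cv.get? character_name = some v) :
    evcLoop character_name cv scenes = (pvKeys character_name scenes).all (fun k => k == v) := by
  induction scenes with
  | nil => simp [evcLoop, pvKeys]
  | cons scene rest ih =>
    have hc : cv.contains character_name = true := by
      rw [PySem.Dict.contains_eq_isSome_get?, h]; rfl
    have hd : cv.getD character_name "" = v := PySem.Dict.getD_of_get?_eq_some cv "" h
    by_cases hm : ((PySem.Dict.mk scene).get? "character" == some character_name) = true
    · simp only [evcLoop, hm, if_true, hc, hd, pvKeys, List.filter_cons, List.map_cons, List.all_cons]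
      by_cases hk : pvVoiceKey scene = v
      · simp [hk, ih, pvKeys]
      · have h1 : decide (v = pvVoiceKey scene) = false := decide_eq_false (fun e => hk e.symm)
        have h2 : (pvVoiceKey scene == v) = false := beq_eq_false_iff_ne.mpr hk
        simp [bne, h1, h2]
    · simp only [evcLoop, hm, pvKeys, List.filter_cons]
      simp only [Bool.not_eq_true] at hm
      simp [ih, pvKeys]

-- min(l) == max(l) on a nonempty list iff every element equals the head
theorem min_eq_max_iff_all (k : String) (rest : List String) :
    ((PySem.List.min? (k :: rest) (fun x => x) == PySem.List.max? (k :: rest) (fun x => x)) = true) ↔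
      (∀ x ∈ (k :: rest), x = k) := by
  obtain ⟨m1, hm1⟩ : ∃ m, PySem.List.min? (k :: rest) (fun x => x) = some m := by
    cases h : PySem.List.min? (k :: rest) (fun x => x) with
    | none => exact absurd ((PySem.List.min?_eq_none_iff _ _).mp h) (by simp)
    | some m => exact ⟨m, rfl⟩
  obtain ⟨m2, hm2⟩ : ∃ m, PySem.List.max? (k :: rest) (fun x => x) = some m := by
    cases h : PySem.List.max? (k :: rest) (fun x => x) with
    | none => exact absurd ((PySem.List.max?_eq_none_iff _ _).mp h) (by simp)
    | some m => exact ⟨m, rfl⟩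
  rw [hm1, hm2]
  constructor
  · intro h x hx
    have hmm : m1 = m2 := by simpa using h
    have h1 := PySem.List.min?_isMin hm1 x hx
    have h2 := PySem.List.max?_isMax hm2 x hx
    have hk1 := PySem.List.min?_isMin hm1 k (by simp)
    have hk2 := PySem.List.max?_isMax hm2 k (by simp)
    simp only at h1 h2 hk1 hk2
    have hx' : x = m1 := le_antisymm (hmm ▸ h2) h1
    have hk' : k = m1 := le_antisymm (hmm ▸ hk2) hk1
    rw [hx', hk']
  · intro h
    have e1 : m1 = k := h m1 (PySem.List.min?_mem hm1)
    have e2 : m2 = k := h m2 (PySem.List.max?_mem hm2)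
    simp [e1, e2]

-- ===== VERDICT (by name: the statement is the Claim_ definition above) =====
theorem ensure_voice_consistency_spec : Claim_equal_ensure_voice_consistency := by
  intro character_name scenes _
  unfold Spec_ensure_voice_consistency ensure_voice_consistency ensure_voice_consistency_alt
  show evcLoop character_name PySem.Dict.empty scenes = _
  have key : ∀ (sc : List (List (String × String))) (cv : PySem.Dict String String),
      cv.get? character_name = none →
      evcLoop character_name cv sc =
        (match pvKeys character_name sc with | [] => true | k :: rest => rest.all (fun x => x == k)) := by
    intro sc
    induction sc with
    | nil => intro cv _; simp [evcLoop, pvKeys]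
    | cons scene rest ih =>
      intro cv hnone
      have hc : cv.contains character_name = false := by
        rw [PySem.Dict.contains_eq_isSome_get?, hnone]; rfl
      by_cases hm : ((PySem.Dict.mk scene).get? "character" == some character_name) = true
      · simp only [evcLoop, hm, if_true, hc, Bool.false_eq_true, if_false, pvKeys, List.filter_cons,
          List.map_cons]
        rw [evcLoop_stored character_name (pvVoiceKey scene) rest _
          (PySem.Dict.get?_insert_self cv character_name (pvVoiceKey scene))]
        simp [pvKeys]
      · simp only [evcLoop, hm, pvKeys, List.filter_cons]
        simp only [Bool.not_eq_true] at hm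
        simp only [Bool.false_eq_true, if_false]
        exact ih cv hnone
  rw [key scenes PySem.Dict.empty (PySem.Dict.get?_empty character_name)]
  cases h : pvKeys character_name scenes with
  | nil =>
    have hl : (scenes.filter (fun s => (PySem.Dict.mk s).get? "character" == some character_name)).map pvVoiceKey = [] := h
    simp [hl]
  | cons k rest =>
    have hl : (scenes.filter (fun s => (PySem.Dict.mk s).get? "character" == some character_name)).map pvVoiceKey = k :: rest := h
    simp only [hl, List.isEmpty_cons, Bool.false_or]
    apply Bool.eq_iff_iff.mpr
    rw [min_eq_max_iff_all]
    simp only [List.all_eq_true, beq_iff_eq, List.mem_cons]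
    constructor
    · rintro hall x (rfl | hx)
      · rfl
      · exact hall x hx
    · intro hall x hx; exact hall x (Or.inr hx)
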